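-- pv_equiv track=rewrite | github.com/ajju170207/Medicare_Ai | ai_innovator/ml_service/generate_disease_json.py | body_system_for
-- ===== SOURCE A (Python) =====
-- def body_system_for(disease):
--     mapping = {
--         'skin': ['Fungal infection', 'Acne', 'Psoriasis', 'Impetigo', 'Chicken pox'],
--         'respiratory': ['Common Cold', 'Pneumonia', 'Bronchial Asthma', 'Tuberculosis'],
--         'digestive': ['GERD', 'Chronic cholestasis', 'Peptic ulcer diseae', 'Gastroenteritis',
--                       'Alcoholic hepatitis', 'Dimorphic hemmorhoids(piles)'],
--         'liver': ['hepatitis A', 'Hepatitis B', 'Hepatitis C', 'Hepatitis D', 'Hepatitis E', 'Jaundice'],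
--         'cardiovascular': ['Heart attack', 'Hypertension ', 'Varicose veins'],
--         'endocrine': ['Diabetes ', 'Hypothyroidism', 'Hyperthyroidism', 'Hypoglycemia'],
--         'immune': ['AIDS', 'Allergy', 'Drug Reaction'],
--         'musculoskeletal': ['Arthritis', 'Osteoarthristis', 'Cervical spondylosis'],
--         'neurological': ['Migraine', 'Paralysis (brain hemorrhage)', '(vertigo) Paroymsal  Positional Vertigo'],
--         'infectious': ['Malaria', 'Dengue', 'Typhoid'],
--         'urinary': ['Urinary tract infection'],
--     }
--     for system, diseases in mapping.items():
--         if disease in diseases: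
--             return system
--     return 'general'
-- ===== SOURCE B (Python) =====
-- # Compact encoded rows "system:name,name,..." parsed once into an inverse
-- # disease->system index; each call is then a single dict lookup.
-- _ROWS = (
--     "skin:Fungal infection,Acne,Psoriasis,Impetigo,Chicken pox",
--     "respiratory:Common Cold,Pneumonia,Bronchial Asthma,Tuberculosis",
--     "digestive:GERD,Chronic cholestasis,Peptic ulcer diseae,Gastroenteritis,"
--     "Alcoholic hepatitis,Dimorphic hemmorhoids(piles)",
--     "liver:hepatitis A,Hepatitis B,Hepatitis C,Hepatitis D,Hepatitis E,Jaundice",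
--     "cardiovascular:Heart attack,Hypertension ,Varicose veins",
--     "endocrine:Diabetes ,Hypothyroidism,Hyperthyroidism,Hypoglycemia",
--     "immune:AIDS,Allergy,Drug Reaction",
--     "musculoskeletal:Arthritis,Osteoarthristis,Cervical spondylosis",
--     "neurological:Migraine,Paralysis (brain hemorrhage),(vertigo) Paroymsal  Positional Vertigo",
--     "infectious:Malaria,Dengue,Typhoid",
--     "urinary:Urinary tract infection",
-- )
--
-- def _build_inv():
--     inv = {}
--     for row in _ROWS:
--         system, names = row.split(':')
--         for name in names.split(','):
--             inv[name] = system
--     return inv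
--
-- _INV = _build_inv()
--
-- def body_system_for(disease):
--     return _INV.get(disease, 'general')
-- ===== Notes on version B (the rewrite author's own statement) =====
-- stated objective: alternative
-- what changed: B replaces A's dict-of-lists literal and per-system membership scan with compact colon/comma-encoded table rows parsed once into an inverse disease-to-system dictionary, so each call is a single dict lookup falling back to the default system.
import Mathlib
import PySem

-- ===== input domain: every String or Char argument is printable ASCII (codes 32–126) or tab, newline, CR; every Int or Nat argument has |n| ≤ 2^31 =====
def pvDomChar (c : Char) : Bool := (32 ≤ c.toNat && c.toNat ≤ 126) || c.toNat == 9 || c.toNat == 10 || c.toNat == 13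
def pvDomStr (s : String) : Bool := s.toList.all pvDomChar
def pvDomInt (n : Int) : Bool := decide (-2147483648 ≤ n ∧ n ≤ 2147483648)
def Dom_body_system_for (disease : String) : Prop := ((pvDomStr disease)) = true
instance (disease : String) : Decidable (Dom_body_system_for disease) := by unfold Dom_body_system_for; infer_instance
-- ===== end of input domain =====

-- B stores the table as one compact encoded string, parses it once into an inverse disease->system dict, and answers with a single lookup (alternative decomposition, same cost).


-- ===== PORT A =====
-- A's 'mapping' dict literal, as an insertion-ordered association list
def aTable : List (String × List String) := [
  ("skin", ["Fungal infection", "Acne", "Psoriasis", "Impetigo", "Chicken pox"]),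
  ("respiratory", ["Common Cold", "Pneumonia", "Bronchial Asthma", "Tuberculosis"]),
  ("digestive", ["GERD", "Chronic cholestasis", "Peptic ulcer diseae", "Gastroenteritis",
                 "Alcoholic hepatitis", "Dimorphic hemmorhoids(piles)"]),
  ("liver", ["hepatitis A", "Hepatitis B", "Hepatitis C", "Hepatitis D", "Hepatitis E", "Jaundice"]),
  ("cardiovascular", ["Heart attack", "Hypertension ", "Varicose veins"]),
  ("endocrine", ["Diabetes ", "Hypothyroidism", "Hyperthyroidism", "Hypoglycemia"]),
  ("immune", ["AIDS", "Allergy", "Drug Reaction"]),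
  ("musculoskeletal", ["Arthritis", "Osteoarthristis", "Cervical spondylosis"]),
  ("neurological", ["Migraine", "Paralysis (brain hemorrhage)", "(vertigo) Paroymsal  Positional Vertigo"]),
  ("infectious", ["Malaria", "Dengue", "Typhoid"]),
  ("urinary", ["Urinary tract infection"])]

-- A's 'for system, diseases in mapping.items(): if disease in diseases: return system' loop
def aScan (disease : String) : List (String × List String) → String
  | [] => "general"
  | (sys, ds) :: rest => if ds.contains disease then sys else aScan disease rest

def body_system_for (disease : String) : String := aScan disease aTable

-- ===== PORT B =====
-- B's compact encoded rows "system:name,name,..."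
def bRows : List String := [
  "skin:Fungal infection,Acne,Psoriasis,Impetigo,Chicken pox",
  "respiratory:Common Cold,Pneumonia,Bronchial Asthma,Tuberculosis",
  "digestive:GERD,Chronic cholestasis,Peptic ulcer diseae,Gastroenteritis," ++
  "Alcoholic hepatitis,Dimorphic hemmorhoids(piles)",
  "liver:hepatitis A,Hepatitis B,Hepatitis C,Hepatitis D,Hepatitis E,Jaundice",
  "cardiovascular:Heart attack,Hypertension ,Varicose veins",
  "endocrine:Diabetes ,Hypothyroidism,Hyperthyroidism,Hypoglycemia",
  "immune:AIDS,Allergy,Drug Reaction",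
  "musculoskeletal:Arthritis,Osteoarthristis,Cervical spondylosis",
  "neurological:Migraine,Paralysis (brain hemorrhage),(vertigo) Paroymsal  Positional Vertigo",
  "infectious:Malaria,Dengue,Typhoid",
  "urinary:Urinary tract infection"]

-- B's '_build_inv': unpack each row on ':', split the names on ',', index every name
-- (split? returns some for the non-empty separators used here; exact Python split semantics)
def bInv : PySem.Dict String String :=
  bRows.foldl (fun inv row =>
    match PySem.Str.split? row ":" with
    | some [system, names] =>
        ((PySem.Str.split? names ",").getD []).foldl (fun inv name => inv.insert name system) inv
    | _ => inv  -- Python's tuple unpack would raise here; unreachable on the constant _ROWS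
  ) PySem.Dict.empty

-- B: '_INV.get(disease, "general")'
def body_system_for_alt (disease : String) : String := bInv.getD disease "general"

-- ===== PRECONDITION & SPEC =====
def Spec_body_system_for (disease : String) (out : String) : Prop := out = body_system_for_alt disease
instance (disease : String) (out : String) : Decidable (Spec_body_system_for disease out) := by unfold Spec_body_system_for; infer_instance

-- ===== CLAIM (what is proved, stated in full; the proofs are below) =====
def Claim_equal_body_system_for : Prop := ∀ (disease : String), Dom_body_system_for disease → Spec_body_system_for disease (body_system_for disease)

-- ===== LEMMAS AND PROOFS =====

-- the flattened (disease, system) pairs of a table, in A's scan order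
def flatPairs (t : List (String × List String)) : List (String × String) :=
  t.flatMap (fun p => p.2.map (fun x => (x, p.1)))

theorem getD_mk_cons (k v : String) (rest : List (String × String)) (x d : String) :
    (PySem.Dict.mk ((k, v) :: rest)).getD x d
      = if k == x then v else (PySem.Dict.mk rest).getD x d := by
  rw [PySem.Dict.getD_eq_get?_getD, PySem.Dict.get?_mk_cons]
  by_cases h : k == x <;> simp [h, PySem.Dict.getD_eq_get?_getD]

theorem getD_mk_seg (sys : String) (ds : List String) (rest : List (String × String))
    (disease : String) :
    (PySem.Dict.mk (ds.map (fun x => (x, sys)) ++ rest)).getD disease "general"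
      = if ds.contains disease then sys
        else (PySem.Dict.mk rest).getD disease "general" := by
  induction ds with
  | nil => simp
  | cons d ds ih =>
    rw [List.map_cons, List.cons_append, getD_mk_cons, ih]
    by_cases h : disease = d
    · simp [h]
    · have h1 : (d == disease) = false := by simp [Ne.symm h]
      have h2 : (disease == d) = false := by simp [h]
      simp [h1, h]

theorem scan_eq_lookup (disease : String) (t : List (String × List String)) :
    aScan disease t = (PySem.Dict.mk (flatPairs t)).getD disease "general" := by
  induction t with
  | nil => simp [aScan, flatPairs, PySem.Dict.getD_eq_get?_getD, PySem.Dict.get?]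
  | cons p t ih =>
    obtain ⟨sys, ds⟩ := p
    rw [aScan, ih]
    show _ = (PySem.Dict.mk (ds.map (fun x => (x, sys)) ++ flatPairs t)).getD disease "general"
    rw [getD_mk_seg]

-- B's parse-and-index of the encoded string evaluates to exactly A's flattened pairs
set_option maxRecDepth 100000 in
set_option maxHeartbeats 40000000 in
theorem bInv_eq : bInv = PySem.Dict.mk (flatPairs aTable) := by decide

-- ===== VERDICT (by name: the statement is the Claim_ definition above) =====
theorem body_system_for_spec : Claim_equal_body_system_for := by
  intro disease _
  unfold Spec_body_system_for body_system_for body_system_for_alt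
  rw [bInv_eq, scan_eq_lookup]
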